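-- pv_equiv track=rewrite | github.com/junho85/ps-python | google-code-jam/2021/01.Qualification Round/2.py | solve
-- ===== SOURCE A (Python) =====
-- def solve(X, Y, arts):
--     arts = list(arts)
--     result = 0
--     for i in range(len(arts)-1):
--         left = arts[i]
--         right = arts[i+1]
--
--         if left == '?':
--             continue
--         if right == '?':
--             arts[i + 1] = left
--             right = left
--
--         if left == 'C' and right == 'J':
--             result += X
--         elif left == 'J' and right == 'C':
--             result += Y
--
--     return result
-- ===== SOURCE B (Python) =====
-- def solve(X, Y, arts):
--     chars = [c for c in arts if c != '?']
--     total = 0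
--     for l, r in zip(chars, chars[1:]):
--         if l == 'C' and r == 'J':
--             total += X
--         elif l == 'J' and r == 'C':
--             total += Y
--     return total
-- ===== Notes on version B (the rewrite author's own statement) =====
-- stated objective: simpler
-- what changed: Instead of A's in-place forward propagation of '?' (overwriting arts[i+1] with the previous character while scanning indices), B drops the wildcards up front and sums the CJ/JC costs over adjacent pairs of the compressed sequence.
import Mathlib
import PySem

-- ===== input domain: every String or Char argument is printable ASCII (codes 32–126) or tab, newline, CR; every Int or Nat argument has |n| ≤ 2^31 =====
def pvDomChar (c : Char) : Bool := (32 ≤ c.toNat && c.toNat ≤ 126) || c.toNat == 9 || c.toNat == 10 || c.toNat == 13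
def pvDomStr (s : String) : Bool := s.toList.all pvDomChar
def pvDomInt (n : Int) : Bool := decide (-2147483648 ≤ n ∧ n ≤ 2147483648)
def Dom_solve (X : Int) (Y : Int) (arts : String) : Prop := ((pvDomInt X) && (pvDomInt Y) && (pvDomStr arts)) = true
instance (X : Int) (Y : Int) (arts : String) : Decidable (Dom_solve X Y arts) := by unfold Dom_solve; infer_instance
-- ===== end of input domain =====

-- B replaces A's in-place forward propagation of '?' with removing the wildcards and
-- summing CJ/JC costs over adjacent pairs of the compressed sequence (objective: simpler).

-- ===== PORT A =====
-- A's loop over i with the in-place write arts[i+1] = left: the state the loop carries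
-- from step i to step i+1 is exactly the (possibly overwritten) suffix arts[i:] and the
-- accumulator; ported as the structural recursion over that same state.
def solveGo (X : Int) (Y : Int) : List Char → Int → Int
  | x :: y :: rest, result =>
      if x = '?' then
        -- 'continue': arts[i+1] untouched
        solveGo X Y (y :: rest) result
      else
        let right := if y = '?' then x else y   -- arts[i+1] = left when right == '?'
        let result' :=
          if x = 'C' ∧ right = 'J' then result + X
          else if x = 'J' ∧ right = 'C' then result + Y
          else result
        solveGo X Y (right :: rest) result'
  | _, result => result
  termination_by l _ => l.length
  decreasing_by all_goals simp

def solve (X : Int) (Y : Int) (arts : String) : Int :=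
  solveGo X Y arts.toList 0

-- ===== PORT B =====
def solve_alt (X : Int) (Y : Int) (arts : String) : Int :=
  let chars := arts.toList.filter (fun c => c ≠ '?')
  (chars.zip chars.tail).foldl
    (fun total p =>
      if p.1 = 'C' ∧ p.2 = 'J' then total + X
      else if p.1 = 'J' ∧ p.2 = 'C' then total + Y
      else total) 0

-- ===== PRECONDITION & SPEC =====
def Spec_solve (X : Int) (Y : Int) (arts : String) (out : Int) : Prop := out = solve_alt X Y arts
instance (X : Int) (Y : Int) (arts : String) (out : Int) : Decidable (Spec_solve X Y arts out) := by unfold Spec_solve; infer_instance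

-- ===== CLAIM (what is proved, stated in full; the proofs are below) =====
def Claim_equal_solve : Prop := ∀ (X : Int) (Y : Int) (arts : String), Dom_solve X Y arts → Spec_solve X Y arts (solve X Y arts)

-- ===== LEMMAS AND PROOFS =====

-- pair cost of two adjacent non-'?' characters
def pvCost (X Y : Int) (x y : Char) : Int :=
  if x = 'C' ∧ y = 'J' then X else if x = 'J' ∧ y = 'C' then Y else 0

-- sum of pair costs over adjacent pairs of a list
def pvPairs (X Y : Int) : List Char → Int
  | x :: y :: rest => pvCost X Y x y + pvPairs X Y (y :: rest)
  | _ => 0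

theorem pvCost_self (X Y : Int) (x : Char) : pvCost X Y x x = 0 := by
  simp only [pvCost]
  split_ifs with h1 h2
  · exact absurd (h1.1.symm.trans h1.2) (by decide)
  · exact absurd (h2.1.symm.trans h2.2) (by decide)
  · rfl

theorem solveGo_eq_pairs (X Y : Int) :
    ∀ (n : Nat) (l : List Char), l.length ≤ n → ∀ (acc : Int),
      solveGo X Y l acc = acc + pvPairs X Y (l.filter (fun c => c ≠ '?')) := by
  intro n
  induction n with
  | zero =>
      intro l hl acc
      have : l = [] := List.length_eq_zero_iff.mp (Nat.le_zero.mp hl)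
      subst this
      simp [solveGo, pvPairs]
  | succ n ih =>
      intro l hl acc
      match l with
      | [] => simp [solveGo, pvPairs]
      | [x] => by_cases hx : x = '?' <;> simp [solveGo, pvPairs, hx]
      | x :: y :: rest =>
        have hlen : (y :: rest).length ≤ n := by simp at hl ⊢; omega
        have hlen' : (x :: rest).length ≤ n := by simp at hl ⊢; omega
        by_cases hx : x = '?'
        · rw [solveGo, if_pos hx, ih _ hlen]
          simp [List.filter_cons, hx]
        · by_cases hy : y = '?'
          · subst hy
            rw [solveGo, if_neg hx]
            simp only [if_true]
            rw [ih _ hlen']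
            have hc : pvCost X Y x x = 0 := pvCost_self X Y x
            simp only [pvCost] at hc
            simp only [List.filter_cons, decide_eq_true_eq]
            split_ifs at hc ⊢ <;> simp_all
          · rw [solveGo, if_neg hx]
            simp only [hy, if_false]
            rw [ih _ hlen]
            simp only [List.filter_cons, hx, hy, decide_eq_true_eq, ite_not]
            simp only [if_false, pvPairs, pvCost]
            split_ifs <;> ring

theorem pairs_foldl (X Y : Int) :
    ∀ (chars : List Char) (acc : Int),
      (chars.zip chars.tail).foldl
        (fun total p =>
          if p.1 = 'C' ∧ p.2 = 'J' then total + X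
          else if p.1 = 'J' ∧ p.2 = 'C' then total + Y
          else total) acc = acc + pvPairs X Y chars := by
  intro chars
  induction chars with
  | nil => intro acc; simp [pvPairs]
  | cons x t ih =>
      intro acc
      cases t with
      | nil => simp [pvPairs]
      | cons y rest =>
          simp only [List.tail_cons] at ih ⊢
          simp only [List.zip_cons_cons, List.foldl_cons]
          rw [ih]
          simp only [pvPairs, pvCost]
          split_ifs <;> ring

-- ===== VERDICT (by name: the statement is the Claim_ definition above) =====
theorem solve_spec : Claim_equal_solve := by
  intro X Y arts _
  unfold Spec_solve solve solve_alt
  rw [solveGo_eq_pairs X Y arts.toList.length arts.toList le_rfl, pairs_foldl]
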